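-- pv_equiv track=rewrite | github.com/radiation/agendable | src/agendable/services/google_calendar_client.py | _append_agendable_link
-- ===== SOURCE A (Python) =====
-- def _append_agendable_link(description: str | None, url: str) -> str:
--     existing = (description or "").strip()
--     link_line = f"Agendable: {url}".strip()
--     if not existing:
--         return link_line
--
--     # If an Agendable link line exists already, replace it (supports base-url changes).
--     lines = existing.splitlines()
--     replaced = False
--     out_lines: list[str] = []
--     for line in lines:
--         if line.strip().startswith("Agendable:"):
--             if not replaced:
--                 out_lines.append(link_line)
--                 replaced = True
--             continue
--         out_lines.append(line)
--
--     rebuilt = "\n".join(out_lines).strip()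
--     if replaced:
--         return rebuilt
--
--     # Otherwise append a new line at the end.
--     return f"{rebuilt}\n\n{link_line}".strip()
-- ===== SOURCE B (Python) =====
-- def _append_agendable_link(description: str | None, url: str) -> str:
--     existing = (description or "").strip()
--     link_line = f"Agendable: {url}".strip()
--     if not existing:
--         return link_line
--
--     lines = existing.splitlines()
--     kept = [line for line in lines if not line.strip().startswith("Agendable:")]
--     if len(kept) == len(lines):
--         # No Agendable line present: append a new one at the end.
--         return ("\n".join(kept).strip() + "\n\n" + link_line).strip()
--
--     # Replace the first Agendable line in place (later ones are dropped).
--     first = next(i for i, line in enumerate(lines) if line.strip().startswith("Agendable:"))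
--     kept.insert(first, link_line)
--     return "\n".join(kept).strip()
-- ===== Notes on version B (the rewrite author's own statement) =====
-- stated objective: alternative
-- what changed: Replaces A's single stateful loop with a replaced-flag by a declarative decomposition: one comprehension filters out all Agendable lines, a length comparison detects whether any existed, and the new link line is inserted back at the first Agendable line's index.
import Mathlib
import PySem

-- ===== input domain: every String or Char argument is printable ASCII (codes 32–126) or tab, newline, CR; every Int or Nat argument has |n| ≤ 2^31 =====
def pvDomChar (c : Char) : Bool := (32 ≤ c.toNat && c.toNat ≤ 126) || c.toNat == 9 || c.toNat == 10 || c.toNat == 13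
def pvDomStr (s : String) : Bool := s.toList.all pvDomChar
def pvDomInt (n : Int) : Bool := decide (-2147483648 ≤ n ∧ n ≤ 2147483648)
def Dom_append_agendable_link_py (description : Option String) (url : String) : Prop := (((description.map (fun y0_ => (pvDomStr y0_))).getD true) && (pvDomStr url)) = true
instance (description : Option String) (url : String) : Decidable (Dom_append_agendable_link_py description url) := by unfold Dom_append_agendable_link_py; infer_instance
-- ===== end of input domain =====

-- B replaces A's single stateful loop (replaced flag + continue) by a declarative
-- decomposition: filter out Agendable lines, compare lengths, insert at the first index.

-- ===== PORT A =====
-- the 'for line in lines' loop of A, state = (replaced, out_lines)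
def pvLoopA (link : String) : List String → Bool → List String → Bool × List String
  | [], replaced, out => (replaced, out)
  | l :: ls, replaced, out =>
    if PySem.Str.startswith (PySem.Str.strip l) "Agendable:" then
      if !replaced then pvLoopA link ls true (out ++ [link])
      else pvLoopA link ls replaced out
    else pvLoopA link ls replaced (out ++ [l])

def append_agendable_link_py (description : Option String) (url : String) : String :=
  let existing := PySem.Str.strip (description.getD "")
  let link_line := PySem.Str.strip ("Agendable: " ++ url)
  if existing = "" then link_line
  else
    let lines := PySem.Str.splitlines existing
    let r := pvLoopA link_line lines false []
    let rebuilt := PySem.Str.strip (PySem.Str.join "\n" r.2)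
    if r.1 then rebuilt
    else PySem.Str.strip (rebuilt ++ "\n\n" ++ link_line)

-- ===== PORT B =====
def append_agendable_link_py_alt (description : Option String) (url : String) : String :=
  let existing := PySem.Str.strip (description.getD "")
  let link_line := PySem.Str.strip ("Agendable: " ++ url)
  if existing = "" then link_line
  else
    let lines := PySem.Str.splitlines existing
    let kept := lines.filter (fun l => !PySem.Str.startswith (PySem.Str.strip l) "Agendable:")
    if kept.length = lines.length then
      PySem.Str.strip (PySem.Str.strip (PySem.Str.join "\n" kept) ++ "\n\n" ++ link_line)
    else
      let first := lines.findIdx (fun l => PySem.Str.startswith (PySem.Str.strip l) "Agendable:")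
      PySem.Str.strip (PySem.Str.join "\n" (PySem.List.insert kept (first : Int) link_line))

-- ===== PRECONDITION & SPEC =====
def Spec_append_agendable_link_py (description : Option String) (url : String) (out : String) : Prop := out = append_agendable_link_py_alt description url
instance (description : Option String) (url : String) (out : String) : Decidable (Spec_append_agendable_link_py description url out) := by unfold Spec_append_agendable_link_py; infer_instance

-- ===== CLAIM (what is proved, stated in full; the proofs are below) =====
def Claim_equal_append_agendable_link_py : Prop := ∀ (description : Option String) (url : String), Dom_append_agendable_link_py description url → Spec_append_agendable_link_py description url (append_agendable_link_py description url)

-- ===== LEMMAS AND PROOFS =====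

-- once the flag is set, the loop keeps exactly the non-Agendable lines
theorem pvLoopA_true (link : String) : ∀ (ls : List String) (out : List String),
    pvLoopA link ls true out =
      (true, out ++ ls.filter (fun l => !PySem.Str.startswith (PySem.Str.strip l) "Agendable:")) := by
  intro ls
  induction ls with
  | nil => intro out; simp only [pvLoopA, List.filter_nil, List.append_nil]
  | cons l ls ih =>
    intro out
    simp only [pvLoopA, Bool.not_true, Bool.false_eq_true, if_false]
    by_cases h : PySem.Str.startswith (PySem.Str.strip l) "Agendable:" = true
    · rw [if_pos h, ih]
      simp only [List.filter_cons, h, Bool.not_true, Bool.false_eq_true, if_false]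
    · rw [if_neg h, ih]
      have h' : PySem.Str.startswith (PySem.Str.strip l) "Agendable:" = false :=
        Bool.eq_false_iff.mpr h
      simp only [List.filter_cons, h', Bool.not_false, if_true,
        List.append_assoc, List.singleton_append]

-- flag-clear loop = filter + insert link at the first matching index (or identity)
theorem pvLoopA_false (link : String) : ∀ (ls : List String) (out : List String),
    pvLoopA link ls false out =
      (if ls.any (fun l => PySem.Str.startswith (PySem.Str.strip l) "Agendable:") = true then
        (true, out ++
          ((ls.filter (fun l => !PySem.Str.startswith (PySem.Str.strip l) "Agendable:")).take
              (ls.findIdx (fun l => PySem.Str.startswith (PySem.Str.strip l) "Agendable:")) ++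
           link ::
            (ls.filter (fun l => !PySem.Str.startswith (PySem.Str.strip l) "Agendable:")).drop
              (ls.findIdx (fun l => PySem.Str.startswith (PySem.Str.strip l) "Agendable:"))))
      else (false, out ++ ls)) := by
  intro ls
  induction ls with
  | nil => intro out
           simp only [pvLoopA, List.any_nil, Bool.false_eq_true, if_false, List.append_nil]
  | cons l ls ih =>
    intro out
    simp only [pvLoopA, Bool.not_false, if_true]
    by_cases h : PySem.Str.startswith (PySem.Str.strip l) "Agendable:" = true
    · rw [if_pos h, pvLoopA_true]
      simp only [List.any_cons, h, Bool.true_or, if_true, List.findIdx_cons,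
        cond_true, List.filter_cons, Bool.not_true, Bool.false_eq_true, if_false, List.take_zero,
        List.drop_zero, List.nil_append, List.append_assoc, List.singleton_append]
    · rw [if_neg h, ih]
      have h' : PySem.Str.startswith (PySem.Str.strip l) "Agendable:" = false :=
        Bool.eq_false_iff.mpr h
      simp only [List.any_cons, h', Bool.false_or, List.findIdx_cons, cond_false,
        List.filter_cons, Bool.not_false, if_true, List.take_succ_cons,
        List.drop_succ_cons]
      split
      · simp only [List.append_assoc, List.cons_append, List.nil_append]
      · simp only [List.append_assoc, List.singleton_append]

theorem pv_findIdx_le_filter_length {α : Type} (p : α → Bool) : ∀ (ls : List α),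
    ls.any p = true → ls.findIdx p ≤ (ls.filter (fun l => !p l)).length := by
  intro ls
  induction ls with
  | nil => simp
  | cons l ls ih =>
    intro h
    by_cases hl : p l = true
    · simp [List.findIdx_cons, hl]
    · simp only [List.any_cons, hl, Bool.false_or] at h
      have hl' : p l = false := Bool.eq_false_iff.mpr hl
      simp only [List.findIdx_cons, hl', cond_false, List.filter_cons, Bool.not_false,
        if_true, List.length_cons]
      exact Nat.succ_le_succ (ih h)

theorem pv_filter_len_eq_iff_not_any {α : Type} (p : α → Bool) (ls : List α) :
    ((ls.filter (fun l => !p l)).length = ls.length ↔ ls.any p = false) := by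
  induction ls with
  | nil => simp
  | cons l ls ih =>
    by_cases hl : p l = true
    · simp only [List.filter_cons, hl, Bool.not_true, Bool.false_eq_true, if_false,
        List.length_cons, List.any_cons, Bool.true_or]
      constructor
      · intro h
        have h2 := List.length_filter_le (fun l => !p l) ls
        omega
      · intro h; exact absurd h (by simp)
    · have hl' : p l = false := Bool.eq_false_iff.mpr hl
      simp only [List.filter_cons, hl', Bool.not_false, if_true,
        List.length_cons, List.any_cons, Bool.false_or, Nat.add_right_cancel_iff, ih]

-- ===== VERDICT (by name: the statement is the Claim_ definition above) =====
theorem append_agendable_link_py_spec : Claim_equal_append_agendable_link_py := by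
  intro description url _
  unfold Spec_append_agendable_link_py append_agendable_link_py append_agendable_link_py_alt
  by_cases he : PySem.Str.strip (description.getD "") = ""
  · simp only [he, if_true]
  · simp only [he, if_false]
    set lines := PySem.Str.splitlines (PySem.Str.strip (description.getD "")) with hlines
    by_cases ha :
        lines.any (fun l => PySem.Str.startswith (PySem.Str.strip l) "Agendable:") = true
    · have hf := pv_findIdx_le_filter_length
        (fun l => PySem.Str.startswith (PySem.Str.strip l) "Agendable:") lines ha
      simp only [] at hf
      have hne : ¬ ((lines.filter
          (fun l => !PySem.Str.startswith (PySem.Str.strip l) "Agendable:")).length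
            = lines.length) := by
        intro hcontra
        rw [pv_filter_len_eq_iff_not_any] at hcontra
        rw [ha] at hcontra
        exact absurd hcontra (by decide)
      have hp := pvLoopA_false (PySem.Str.strip ("Agendable: " ++ url)) lines []
      rw [if_pos ha] at hp
      obtain ⟨h1, h2⟩ := Prod.ext_iff.mp hp
      rw [h1, if_pos rfl, h2, List.nil_append, if_neg hne,
        PySem.List.insert_natCast _ _ _ hf]
    · have ha' : lines.any (fun l => PySem.Str.startswith (PySem.Str.strip l) "Agendable:")
          = false := Bool.eq_false_iff.mpr ha
      have hfs : lines.filter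
          (fun l => !PySem.Str.startswith (PySem.Str.strip l) "Agendable:") = lines := by
        apply List.filter_eq_self.mpr
        intro a hha
        have hpa : PySem.Str.startswith (PySem.Str.strip a) "Agendable:" = false :=
          Bool.eq_false_iff.mpr (List.any_eq_false.mp ha' a hha)
        simp only [hpa, Bool.not_false]
      have hp := pvLoopA_false (PySem.Str.strip ("Agendable: " ++ url)) lines []
      rw [if_neg ha] at hp
      obtain ⟨h1, h2⟩ := Prod.ext_iff.mp hp
      rw [h1, if_neg (by exact Bool.false_ne_true), h2, List.nil_append, hfs, if_pos rfl]
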